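-- pv_equiv track=rewrite | github.com/joye/vlsi-cad | boolean_calculator.py | choose_most_binate
-- ===== SOURCE A (Python) =====
-- from enum import Enum
--
-- class CubeIndex(Enum):
--     VAR_NUM = 0
--     CUBE_NUM = 1
--     CUBES = 2
--
-- def choose_most_binate(f):
--     result = {}  # this type is {2(index for y) : {1(+y):[0,1,2], -1(-y):[3,4]}, ...}
--     for index, cube in enumerate(f[CubeIndex.CUBES.value]):
--         for cube_item in cube[1:]:
--             absolute_item = abs(cube_item)
--             key = cube_item // absolute_item
--             if absolute_item in result:
--                 if key in result[absolute_item]: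
--                     result[absolute_item][key].append(index)
--                 else:
--                     result[absolute_item][key] = [index]
--             else:
--                 result[absolute_item] = {}
--                 result[absolute_item][key] = [index]
--     unate_cube = {}
--     binate_cube = {}
--     for k, val in result.items():
--         if len(val) == 1:
--             for i in val.keys():
--                 unate_cube[k] = len(val[i])
--         else:
--             true_form = len(val[1])
--             complement_form = len(val[-1])
--             binate_cube[k] = abs(true_form - complement_form)
--     if len(binate_cube) != 0:
--         d = sorted(binate_cube.keys(), key=lambda x: binate_cube[x])
--     else:
--         d = sorted(unate_cube.keys(), key=lambda x: unate_cube[x])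
--     return d[0], result[d[0]]
-- ===== SOURCE B (Python) =====
-- def choose_most_binate(f):
--     # Phase 1 (same returned structure): var -> {sign: [cube indices]}.
--     result = {}
--     for index, cube in enumerate(f[2]):
--         for lit in cube[1:]:
--             v = abs(lit)
--             result.setdefault(v, {}).setdefault(lit // v, []).append(index)
--
--     # Phase 2: single min() with a (class, score) key instead of two dicts + sort.
--     def rank(var):
--         signs = result[var]
--         if len(signs) == 1:
--             return (1, len(next(iter(signs.values()))))
--         return (0, abs(len(signs[1]) - len(signs[-1])))
--
--     best = min(result, key=rank)
--     return best, result[best]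
-- ===== Notes on version B (the rewrite author's own statement) =====
-- stated objective: simpler
-- what changed: Phase 1's nested membership branches become a setdefault chain, and the two score dicts plus stable sort are replaced by a single min() over the variables with a (binate-priority, score) tuple key, which preserves first-insertion tie-breaking.
import Mathlib
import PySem

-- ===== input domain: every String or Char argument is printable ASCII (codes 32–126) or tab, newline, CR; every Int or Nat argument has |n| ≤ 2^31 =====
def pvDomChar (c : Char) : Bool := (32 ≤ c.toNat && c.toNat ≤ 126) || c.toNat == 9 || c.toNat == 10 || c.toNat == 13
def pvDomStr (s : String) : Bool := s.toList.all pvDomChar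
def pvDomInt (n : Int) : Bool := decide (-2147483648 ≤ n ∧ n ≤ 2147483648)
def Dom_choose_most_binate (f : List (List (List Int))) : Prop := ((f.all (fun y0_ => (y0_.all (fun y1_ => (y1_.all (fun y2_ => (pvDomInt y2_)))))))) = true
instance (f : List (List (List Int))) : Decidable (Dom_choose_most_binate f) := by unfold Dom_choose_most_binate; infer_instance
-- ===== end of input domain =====

-- B replaces A's two score dicts + stable sort by a single first-minimum scan with a
-- (binate-priority, score) key; phase 1 keeps the returned nested dict (built via setdefault/modify).

-- ===== PORT A =====
-- A's inner literal step: the nested membership branches of the Python loop body.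
def pvLitStepA (index : Int) (result : PySem.Dict Int (PySem.Dict Int (List Int)))
    (item : Int) : PySem.Dict Int (PySem.Dict Int (List Int)) :=
  let a : Int := |item|
  let key : Int := PySem.Int.floordiv item a
  if result.contains a then
    if (result.getD a PySem.Dict.empty).contains key then
      result.insert a ((result.getD a PySem.Dict.empty).insert key
        ((result.getD a PySem.Dict.empty).getD key [] ++ [index]))
    else
      result.insert a ((result.getD a PySem.Dict.empty).insert key [index])
  else
    result.insert a (PySem.Dict.empty.insert key [index])

-- A's first loop (builds the nested result dict).
def pvResultA (f : List (List (List Int))) : PySem.Dict Int (PySem.Dict Int (List Int)) :=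
  (PySem.List.enumerate (PySem.List.pyGetD f 2 [])).foldl
    (fun res ic => (ic.2.drop 1).foldl (pvLitStepA ic.1) res) PySem.Dict.empty

-- A's second loop body: fills the unate/binate score dicts.
def pvUBStep (ub : PySem.Dict Int Int × PySem.Dict Int Int)
    (kv : Int × PySem.Dict Int (List Int)) : PySem.Dict Int Int × PySem.Dict Int Int :=
  if kv.2.size == 1 then
    (kv.2.keys.foldl (fun u i => u.insert kv.1 ((kv.2.getD i []).length : Int)) ub.1, ub.2)
  else
    (ub.1, ub.2.insert kv.1 (|((kv.2.getD 1 []).length : Int) - ((kv.2.getD (-1) []).length : Int)|))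

def pvUB (r : PySem.Dict Int (PySem.Dict Int (List Int))) :
    PySem.Dict Int Int × PySem.Dict Int Int :=
  r.items.foldl pvUBStep (PySem.Dict.empty, PySem.Dict.empty)

-- A's "d": the sorted key list (binate scores if any, else unate scores).
def pvD (r : PySem.Dict Int (PySem.Dict Int (List Int))) : List Int :=
  if (pvUB r).2.size ≠ 0 then
    PySem.List.sorted (pvUB r).2.keys (fun x => (pvUB r).2.getD x 0) false
  else
    PySem.List.sorted (pvUB r).1.keys (fun x => (pvUB r).1.getD x 0) false

def choose_most_binate (f : List (List (List Int))) : Int × (List (Int × List Int)) :=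
  (PySem.List.pyGetD (pvD (pvResultA f)) 0 0,
   ((pvResultA f).getD (PySem.List.pyGetD (pvD (pvResultA f)) 0 0) PySem.Dict.empty).items)

-- ===== PORT B =====
-- B's inner literal step: result.setdefault(v, {}).setdefault(lit // v, []).append(index).
def pvLitStepB (index : Int) (result : PySem.Dict Int (PySem.Dict Int (List Int)))
    (lit : Int) : PySem.Dict Int (PySem.Dict Int (List Int)) :=
  let v : Int := |lit|
  result.modify v PySem.Dict.empty
    (fun signs => signs.modify (PySem.Int.floordiv lit v) [] (· ++ [index]))

def pvResultB (f : List (List (List Int))) : PySem.Dict Int (PySem.Dict Int (List Int)) :=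
  (PySem.List.enumerate (PySem.List.pyGetD f 2 [])).foldl
    (fun res ic => (ic.2.drop 1).foldl (pvLitStepB ic.1) res) PySem.Dict.empty

-- B's rank key: (binate-priority, score).
def pvRank (result : PySem.Dict Int (PySem.Dict Int (List Int))) (var : Int) : Int × Int :=
  let signs := result.getD var PySem.Dict.empty
  if signs.size == 1 then (1, ((signs.values.headD []).length : Int))
  else (0, |((signs.getD 1 []).length : Int) - ((signs.getD (-1) []).length : Int)|)

def choose_most_binate_alt (f : List (List (List Int))) : Int × (List (Int × List Int)) :=
  match PySem.List.min2? (pvResultB f).keys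
      (fun v => (pvRank (pvResultB f) v).1) (fun v => (pvRank (pvResultB f) v).2) with
  | some best => (best, ((pvResultB f).getD best PySem.Dict.empty).items)
  | none => (0, [])  -- unreachable under Pre_ (the Python raises ValueError on an empty min())

-- ===== PRECONDITION & SPEC =====
-- Pre_ excludes exactly the inputs where the Python A raises: f shorter than 3 (IndexError on
-- f[2]), a 0 literal (ZeroDivisionError), or no literal at all (IndexError on d[0]).
def Pre_choose_most_binate (f : List (List (List Int))) : Prop :=
  3 ≤ f.length ∧
  ((f.getD 2 []).all (fun cube => (cube.drop 1).all (fun x => decide (x ≠ 0)))) = true ∧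
  ((f.getD 2 []).any (fun cube => decide (2 ≤ cube.length))) = true
instance (f : List (List (List Int))) : Decidable (Pre_choose_most_binate f) := by
  unfold Pre_choose_most_binate; infer_instance

def pvWitness_choose_most_binate : List (List (List Int)) := [[[1]], [[3]], [[0, 1, 2], [0, -1]]]

def Spec_choose_most_binate (f : List (List (List Int))) (out : Int × (List (Int × List Int))) : Prop := out = choose_most_binate_alt f
instance (f : List (List (List Int))) (out : Int × (List (Int × List Int))) : Decidable (Spec_choose_most_binate f out) := by unfold Spec_choose_most_binate; infer_instance

-- ===== CLAIM (what is proved, stated in full; the proofs are below) =====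
def Claim_equal_choose_most_binate : Prop := ∀ (f : List (List (List Int))), Dom_choose_most_binate f → Pre_choose_most_binate f → Spec_choose_most_binate f (choose_most_binate f)

-- ===== LEMMAS AND PROOFS =====

-- The two phase-1 steps are the same function.
theorem pvLitStep_eq : pvLitStepA = pvLitStepB := by
  funext i d x
  unfold pvLitStepA pvLitStepB
  simp only [PySem.Dict.modify]
  by_cases h1 : d.contains |x| = true
  · by_cases h2 : (d.getD |x| PySem.Dict.empty).contains (PySem.Int.floordiv x |x|) = true
    · simp only [h1, h2, if_pos]
    · rw [if_pos h1, if_neg (by simp [h2]),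
        PySem.Dict.getD_of_not_contains _ ([] : List Int) (by simpa using h2)]
      rfl
  · rw [if_neg (by simp [h1]),
      PySem.Dict.getD_of_not_contains _ (PySem.Dict.empty : PySem.Dict Int (List Int)) (by simpa using h1),
      PySem.Dict.getD_empty]
    rfl

theorem pvResult_eq : pvResultA = pvResultB := by
  funext f
  unfold pvResultA pvResultB
  rw [pvLitStep_eq]

-- first minimum, single Int key (recursive form)
def pvFm1 {α : Type} (g : α → Int) : List α → Option α
  | [] => none
  | x :: t =>
    match pvFm1 g t with
    | none => some x
    | some m => if g m < g x then some m else some x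

-- first minimum, lexicographic (Int, Int) key (recursive form)
def pvFm2 {α : Type} (k1 k2 : α → Int) : List α → Option α
  | [] => none
  | x :: t =>
    match pvFm2 k1 k2 t with
    | none => some x
    | some m =>
      if (decide (k1 m < k1 x) || !decide (k1 x < k1 m) && decide (k2 m < k2 x)) = true
      then some m else some x

theorem pvFm1_cons {α : Type} (g : α → Int) (x : α) (t : List α) :
    pvFm1 g (x :: t) =
      match pvFm1 g t with
      | none => some x
      | some m => if g m < g x then some m else some x := rfl

theorem pvFm2_cons {α : Type} (k1 k2 : α → Int) (x : α) (t : List α) :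
    pvFm2 k1 k2 (x :: t) =
      match pvFm2 k1 k2 t with
      | none => some x
      | some m =>
        if (decide (k1 m < k1 x) || !decide (k1 x < k1 m) && decide (k2 m < k2 x)) = true
        then some m else some x := rfl

theorem pvFm1_mem {α : Type} (g : α → Int) (l : List α) (m : α)
    (h : pvFm1 g l = some m) : m ∈ l := by
  induction l with
  | nil => simp [pvFm1] at h
  | cons x t ih =>
    rw [pvFm1_cons] at h
    cases hfm : pvFm1 g t with
    | none => rw [hfm] at h; simp at h; simp [h]
    | some m' =>
      rw [hfm] at h
      have h' : (if g m' < g x then some m' else some x) = some m := h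
      by_cases hc : g m' < g x
      · rw [if_pos hc] at h'; simp at h'; subst h'; exact List.mem_cons_of_mem _ (ih hfm)
      · rw [if_neg hc] at h'; simp at h'; simp [h']

theorem pvFm1_none_iff {α : Type} (g : α → Int) (l : List α) :
    pvFm1 g l = none ↔ l = [] := by
  cases l with
  | nil => simp [pvFm1]
  | cons x t =>
    rw [pvFm1_cons]
    cases pvFm1 g t <;> simp_all <;> split <;> simp

theorem pvFm2_mem {α : Type} (k1 k2 : α → Int) (l : List α) (m : α)
    (h : pvFm2 k1 k2 l = some m) : m ∈ l := by
  induction l with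
  | nil => simp [pvFm2] at h
  | cons x t ih =>
    rw [pvFm2_cons] at h
    cases hfm : pvFm2 k1 k2 t with
    | none => rw [hfm] at h; simp at h; simp [h]
    | some m' =>
      rw [hfm] at h
      have h' : (if (decide (k1 m' < k1 x) || !decide (k1 x < k1 m') && decide (k2 m' < k2 x)) = true
          then some m' else some x) = some m := h
      by_cases hc : (decide (k1 m' < k1 x) || !decide (k1 x < k1 m') && decide (k2 m' < k2 x)) = true
      · rw [if_pos hc] at h'; simp at h'; subst h'; exact List.mem_cons_of_mem _ (ih hfm)
      · rw [if_neg hc] at h'; simp at h'; simp [h']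

theorem pvFm2_none_iff {α : Type} (k1 k2 : α → Int) (l : List α) :
    pvFm2 k1 k2 l = none ↔ l = [] := by
  cases l with
  | nil => simp [pvFm2]
  | cons x t =>
    rw [pvFm2_cons]
    cases pvFm2 k1 k2 t <;> simp_all <;> split <;> simp

theorem pvFm1_congr {α : Type} (g g' : α → Int) (l : List α)
    (h : ∀ x ∈ l, g x = g' x) : pvFm1 g l = pvFm1 g' l := by
  induction l with
  | nil => rfl
  | cons x t ih =>
    have ht : ∀ y ∈ t, g y = g' y := fun y hy => h y (List.mem_cons_of_mem _ hy)
    rw [pvFm1_cons, pvFm1_cons, ih ht]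
    cases hfm : pvFm1 g' t with
    | none => rfl
    | some m =>
      have hm : m ∈ t := pvFm1_mem g' t m hfm
      show (if g m < g x then some m else some x) = (if g' m < g' x then some m else some x)
      rw [h x List.mem_cons_self, ht m hm]

theorem pvFm1_map {α β : Type} (g : β → Int) (h : α → β) (l : List α) :
    pvFm1 g (l.map h) = (pvFm1 (fun a => g (h a)) l).map h := by
  induction l with
  | nil => rfl
  | cons x t ih =>
    simp only [List.map_cons]
    rw [pvFm1_cons, pvFm1_cons, ih]
    cases pvFm1 (fun a => g (h a)) t <;> simp <;> split <;> simp

theorem pvFm2_congr {α : Type} (k1 k2 k1' k2' : α → Int) (l : List α)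
    (h : ∀ x ∈ l, k1 x = k1' x ∧ k2 x = k2' x) : pvFm2 k1 k2 l = pvFm2 k1' k2' l := by
  induction l with
  | nil => rfl
  | cons x t ih =>
    have ht : ∀ y ∈ t, k1 y = k1' y ∧ k2 y = k2' y := fun y hy => h y (List.mem_cons_of_mem _ hy)
    rw [pvFm2_cons, pvFm2_cons, ih ht]
    cases hfm : pvFm2 k1' k2' t with
    | none => rfl
    | some m =>
      have hm : m ∈ t := pvFm2_mem k1' k2' t m hfm
      show (if (decide (k1 m < k1 x) || !decide (k1 x < k1 m) && decide (k2 m < k2 x)) = true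
            then some m else some x) =
          (if (decide (k1' m < k1' x) || !decide (k1' x < k1' m) && decide (k2' m < k2' x)) = true
            then some m else some x)
      rw [(h x List.mem_cons_self).1, (h x List.mem_cons_self).2,
        (ht m hm).1, (ht m hm).2]

theorem pvFm2_map {α β : Type} (k1 k2 : β → Int) (h : α → β) (l : List α) :
    pvFm2 k1 k2 (l.map h) = (pvFm2 (fun a => k1 (h a)) (fun a => k2 (h a)) l).map h := by
  induction l with
  | nil => rfl
  | cons x t ih =>
    simp only [List.map_cons]
    rw [pvFm2_cons, pvFm2_cons, ih]
    cases pvFm2 (fun a => k1 (h a)) (fun a => k2 (h a)) t <;> simp <;> split <;> simp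

theorem pvFm1_head_le {α : Type} (g : α → Int) (x : α) (t : List α) (c : α)
    (h : pvFm1 g (x :: t) = some c) : g c ≤ g x := by
  rw [pvFm1_cons] at h
  cases hfm : pvFm1 g t with
  | none => rw [hfm] at h; simp at h; subst h; exact le_rfl
  | some m =>
    rw [hfm] at h
    have h' : (if g m < g x then some m else some x) = some c := h
    by_cases hc : g m < g x
    · rw [if_pos hc] at h'; simp at h'; subst h'; omega
    · rw [if_neg hc] at h'; simp at h'; subst h'; exact le_rfl

theorem pvFm2_head_le {α : Type} (k1 k2 : α → Int) (x : α) (t : List α) (c : α)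
    (h : pvFm2 k1 k2 (x :: t) = some c) :
    k1 c < k1 x ∨ (k1 c ≤ k1 x ∧ k2 c ≤ k2 x) := by
  rw [pvFm2_cons] at h
  cases hfm : pvFm2 k1 k2 t with
  | none => rw [hfm] at h; simp at h; subst h; right; exact ⟨le_rfl, le_rfl⟩
  | some m =>
    rw [hfm] at h
    have h' : (if (decide (k1 m < k1 x) || !decide (k1 x < k1 m) && decide (k2 m < k2 x)) = true
        then some m else some x) = some c := h
    by_cases hc : (decide (k1 m < k1 x) || !decide (k1 x < k1 m) && decide (k2 m < k2 x)) = true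
    · rw [if_pos hc] at h'
      simp only [Bool.or_eq_true, Bool.and_eq_true, Bool.not_eq_true', decide_eq_true_eq,
        decide_eq_false_iff_not] at hc
      simp at h'; subst h'; omega
    · rw [if_neg hc] at h'; simp at h'; subst h'; right; exact ⟨le_rfl, le_rfl⟩

-- a left fold with the first-minimum step computes pvFm1
theorem pv_foldl_fm1 {α : Type} (g : α → Int) (step : Option α → α → Option α)
    (hsome : ∀ (m x : α), step (some m) x = if g x < g m then some x else some m) :
    ∀ (t : List α) (m : α), t.foldl step (some m) = pvFm1 g (m :: t) := by
  intro t
  induction t with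
  | nil => intro m; simp [pvFm1]
  | cons x t ih =>
    intro m
    rw [List.foldl_cons, hsome m x]
    by_cases hxm : g x < g m
    · rw [if_pos hxm, ih x, pvFm1_cons g m (x :: t)]
      cases hc : pvFm1 g (x :: t) with
      | none => exact absurd ((pvFm1_none_iff g (x :: t)).mp hc) (by simp)
      | some c =>
        have hcx := pvFm1_head_le g x t c hc
        show some c = if g c < g m then some c else some m
        rw [if_pos (by omega : g c < g m)]
    · rw [if_neg hxm, ih m, pvFm1_cons g m t, pvFm1_cons g m (x :: t), pvFm1_cons g x t]
      cases hfm : pvFm1 g t with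
      | none =>
        show some m = if g x < g m then some x else some m
        rw [if_neg hxm]
      | some m' =>
        show (if g m' < g m then some m' else some m)
            = (match (if g m' < g x then some m' else some x) with
               | none => some m
               | some c => if g c < g m then some c else some m)
        by_cases h1 : g m' < g x
        · rw [if_pos h1]
        · rw [if_neg h1]
          show (if g m' < g m then some m' else some m) = if g x < g m then some x else some m
          have h2 : ¬ g m' < g m := by omega
          rw [if_neg h2, if_neg hxm]

-- a left fold with the lexicographic first-minimum step computes pvFm2
theorem pv_foldl_fm2 {α : Type} (k1 k2 : α → Int) (step : Option α → α → Option α)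
    (hsome : ∀ (m x : α), step (some m) x =
      if (decide (k1 x < k1 m) || !decide (k1 m < k1 x) && decide (k2 x < k2 m)) = true
      then some x else some m) :
    ∀ (t : List α) (m : α), t.foldl step (some m) = pvFm2 k1 k2 (m :: t) := by
  intro t
  induction t with
  | nil => intro m; simp [pvFm2]
  | cons x t ih =>
    intro m
    rw [List.foldl_cons, hsome m x]
    by_cases hxm : (decide (k1 x < k1 m) || !decide (k1 m < k1 x) && decide (k2 x < k2 m)) = true
    · rw [if_pos hxm, ih x, pvFm2_cons k1 k2 m (x :: t)]
      cases hc : pvFm2 k1 k2 (x :: t) with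
      | none => exact absurd ((pvFm2_none_iff k1 k2 (x :: t)).mp hc) (by simp)
      | some c =>
        have hcx := pvFm2_head_le k1 k2 x t c hc
        simp only [Bool.or_eq_true, Bool.and_eq_true, Bool.not_eq_true', decide_eq_true_eq,
          decide_eq_false_iff_not] at hxm
        show some c =
          if (decide (k1 c < k1 m) || !decide (k1 m < k1 c) && decide (k2 c < k2 m)) = true
          then some c else some m
        rw [if_pos (by
          simp only [Bool.or_eq_true, Bool.and_eq_true, Bool.not_eq_true', decide_eq_true_eq,
            decide_eq_false_iff_not]
          omega)]
    · rw [if_neg hxm, ih m, pvFm2_cons k1 k2 m t, pvFm2_cons k1 k2 m (x :: t), pvFm2_cons k1 k2 x t]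
      cases hfm : pvFm2 k1 k2 t with
      | none =>
        show some m =
          if (decide (k1 x < k1 m) || !decide (k1 m < k1 x) && decide (k2 x < k2 m)) = true
          then some x else some m
        rw [if_neg hxm]
      | some m' =>
        show (if (decide (k1 m' < k1 m) || !decide (k1 m < k1 m') && decide (k2 m' < k2 m)) = true
              then some m' else some m)
            = (match (if (decide (k1 m' < k1 x) || !decide (k1 x < k1 m') && decide (k2 m' < k2 x)) = true
                      then some m' else some x) with
               | none => some m
               | some c =>
                 if (decide (k1 c < k1 m) || !decide (k1 m < k1 c) && decide (k2 c < k2 m)) = true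
                 then some c else some m)
        by_cases h1 : (decide (k1 m' < k1 x) || !decide (k1 x < k1 m') && decide (k2 m' < k2 x)) = true
        · rw [if_pos h1]
        · rw [if_neg h1]
          show (if (decide (k1 m' < k1 m) || !decide (k1 m < k1 m') && decide (k2 m' < k2 m)) = true
              then some m' else some m) =
            if (decide (k1 x < k1 m) || !decide (k1 m < k1 x) && decide (k2 x < k2 m)) = true
            then some x else some m
          simp only [Bool.or_eq_true, Bool.and_eq_true, Bool.not_eq_true', decide_eq_true_eq,
            decide_eq_false_iff_not] at hxm h1
          have h2 : ¬ (decide (k1 m' < k1 m) || !decide (k1 m < k1 m') && decide (k2 m' < k2 m)) = true := by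
            simp only [Bool.or_eq_true, Bool.and_eq_true, Bool.not_eq_true', decide_eq_true_eq,
              decide_eq_false_iff_not]
            omega
          rw [if_neg h2, if_neg (by
            simp only [Bool.or_eq_true, Bool.and_eq_true, Bool.not_eq_true', decide_eq_true_eq,
              decide_eq_false_iff_not]
            omega)]

theorem min2?_eq_pvFm2 {α : Type} (k1 k2 : α → Int) (l : List α) :
    PySem.List.min2? l k1 k2 = pvFm2 k1 k2 l := by
  cases l with
  | nil => rfl
  | cons x t =>
    unfold PySem.List.min2?
    rw [List.foldl_cons]
    exact pv_foldl_fm2 k1 k2 _ (fun m y => rfl) t x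

-- head of the stable insertion sort = first minimum
theorem head?_insertBy {α : Type} (g : α → Int) (x : α) (acc : List α) :
    (PySem.List.insertBy (fun a b => decide (g a < g b)) x acc).head? =
      match acc.head? with
      | none => some x
      | some m => if g x < g m then some x else some m := by
  cases acc with
  | nil => rfl
  | cons y ys =>
    simp only [PySem.List.insertBy, List.head?_cons]
    by_cases h : g x < g y <;> simp [h]

theorem head?_foldl_insertBy {α : Type} (g : α → Int) (xs : List α) : ∀ (acc : List α),
    (xs.foldl (fun a x => PySem.List.insertBy (fun a b => decide (g a < g b)) x a) acc).head? =
    xs.foldl (fun o x => match o with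
      | none => some x
      | some m => if g x < g m then some x else some m) acc.head? := by
  induction xs with
  | nil => intro acc; rfl
  | cons x t ih =>
    intro acc
    simp only [List.foldl_cons]
    rw [ih, head?_insertBy]

theorem head?_sorted {α : Type} (g : α → Int) (xs : List α) :
    (PySem.List.sorted xs g false).head? = pvFm1 g xs := by
  have h : (PySem.List.sorted xs g false).head? =
      (xs.foldl (fun a x => PySem.List.insertBy (fun a b => decide (g a < g b)) x a) []).head? := rfl
  rw [h, head?_foldl_insertBy g xs []]
  cases xs with
  | nil => rfl
  | cons x t =>
    rw [List.foldl_cons]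
    exact pv_foldl_fm1 g _ (fun m y => rfl) t x

-- selection abbreviations (proof-side views of the per-variable data)
def pvUn (p : Int × PySem.Dict Int (List Int)) : Bool := p.2.size == 1
def pvSu (p : Int × PySem.Dict Int (List Int)) : Int := ((p.2.values.headD []).length : Int)
def pvSb (p : Int × PySem.Dict Int (List Int)) : Int :=
  |((p.2.getD 1 []).length : Int) - ((p.2.getD (-1) []).length : Int)|
def pvK2 (p : Int × PySem.Dict Int (List Int)) : Int := if pvUn p then pvSu p else pvSb p

-- the split lemma: lexicographic first-min with a 0/1 class key picks the first
-- minimum of the class-0 sublist if that is nonempty, else of the whole list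
theorem pvFm2_split {α : Type} (un : α → Bool) (s : α → Int) (l : List α) :
    pvFm2 (fun p => if un p then (1 : Int) else 0) s l =
      if l.filter (fun p => !un p) = [] then pvFm1 s l
      else pvFm1 s (l.filter (fun p => !un p)) := by
  induction l with
  | nil => rfl
  | cons x t ih =>
    simp only [pvFm2, ih, List.filter_cons]
    by_cases hx : un x
    · simp only [hx, Bool.not_true, if_neg (by simp : ¬ (false = true))]
      by_cases hft : t.filter (fun p => !un p) = []
      · have hall : ∀ y ∈ t, un y = true := by
          intro y hy
          have := List.filter_eq_nil_iff.mp hft y hy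
          simpa using this
        simp only [hft, if_pos rfl, pvFm1]
        cases hfm : pvFm1 s t with
        | none => rfl
        | some m =>
          have hm := pvFm1_mem s t m hfm
          have hum : un m = true := hall m hm
          simp [hx, hum]
      · simp only [hft, if_neg hft]
        cases hfm : pvFm1 s (t.filter (fun p => !un p)) with
        | none => exact absurd ((pvFm1_none_iff _ _).mp hfm) hft
        | some m =>
          have hm := pvFm1_mem _ _ m hfm
          have hum : un m = false := by
            have := (List.mem_filter.mp hm).2; simpa using this
          simp [hx, hum]
    · have hx' : un x = false := by simpa using hx
      simp only [hx', Bool.not_false, if_pos rfl]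
      have hne : ¬ ((x :: t.filter (fun p => !un p)) = []) := by simp
      by_cases hft : t.filter (fun p => !un p) = []
      · have hall : ∀ y ∈ t, un y = true := by
          intro y hy
          have := List.filter_eq_nil_iff.mp hft y hy
          simpa using this
        simp only [hft, if_pos rfl, if_neg hne, pvFm1]
        cases hfm : pvFm1 s t with
        | none => rfl
        | some m =>
          have hum : un m = true := hall m (pvFm1_mem s t m hfm)
          simp [hx', hum, pvFm1]
      · simp only [hft, if_neg hft, if_neg hne, pvFm1]
        cases hfm : pvFm1 s (t.filter (fun p => !un p)) with
        | none => exact absurd ((pvFm1_none_iff _ _).mp hfm) hft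
        | some m =>
          have hum : un m = false := by
            have := (List.mem_filter.mp (pvFm1_mem _ _ m hfm)).2; simpa using this
          simp [hx', hum, pvFm1, hfm]

-- characterisation of A's unate/binate fold
theorem pv_ubFold (l : List (Int × PySem.Dict Int (List Int))) :
    ∀ (u0 b0 : PySem.Dict Int Int),
    (l.map (·.1)).Nodup →
    (∀ p ∈ l, u0.contains p.1 = false) →
    (∀ p ∈ l, b0.contains p.1 = false) →
    (l.foldl pvUBStep (u0, b0)).1.items
        = u0.items ++ (l.filter pvUn).map (fun p => (p.1, pvSu p)) ∧
    (l.foldl pvUBStep (u0, b0)).2.items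
        = b0.items ++ (l.filter (fun p => !pvUn p)).map (fun p => (p.1, pvSb p)) := by
  induction l with
  | nil => intro u0 b0 _ _ _; simp
  | cons kv t ih =>
    intro u0 b0 hnd hu0 hb0
    have hkv1 : kv.1 ∉ t.map (·.1) := (List.nodup_cons.mp (by simpa using hnd)).1
    have hndt : (t.map (·.1)).Nodup := (List.nodup_cons.mp (by simpa using hnd)).2
    have hne : ∀ p ∈ t, p.1 ≠ kv.1 := by
      intro p hp h
      exact hkv1 (h ▸ List.mem_map_of_mem hp)
    rw [List.foldl_cons]
    by_cases hun : pvUn kv = true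
    · -- unate: the keys-loop writes the single list's length into u
      obtain ⟨q, hq⟩ := List.length_eq_one_iff.mp (by simpa [pvUn, PySem.Dict.size] using hun)
      have hstep : pvUBStep (u0, b0) kv = (u0.insert kv.1 (pvSu kv), b0) := by
        unfold pvUBStep
        rw [if_pos (by simpa [pvUn] using hun)]
        simp [PySem.Dict.keys, PySem.Dict.values, PySem.Dict.getD, PySem.Dict.get?, hq, pvSu]
      rw [hstep]
      have hufresh : ∀ p ∈ t, (u0.insert kv.1 (pvSu kv)).contains p.1 = false := by
        intro p hp
        rw [PySem.Dict.contains_insert]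
        simp [hne p hp, hu0 p (List.mem_cons_of_mem _ hp)]
      obtain ⟨ihu, ihb⟩ := ih (u0.insert kv.1 (pvSu kv)) b0 hndt hufresh
        (fun p hp => hb0 p (List.mem_cons_of_mem _ hp))
      constructor
      · rw [ihu, PySem.Dict.items_insert_of_not_contains u0 _ (hu0 kv List.mem_cons_self)]
        simp [hun]
      · rw [ihb]
        simp [hun]
    · -- binate: insert the score into b
      have hstep : pvUBStep (u0, b0) kv = (u0, b0.insert kv.1 (pvSb kv)) := by
        unfold pvUBStep
        rw [if_neg (by simpa [pvUn] using hun)]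
        rfl
      rw [hstep]
      have hbfresh : ∀ p ∈ t, (b0.insert kv.1 (pvSb kv)).contains p.1 = false := by
        intro p hp
        rw [PySem.Dict.contains_insert]
        simp [hne p hp, hb0 p (List.mem_cons_of_mem _ hp)]
      obtain ⟨ihu, ihb⟩ := ih u0 (b0.insert kv.1 (pvSb kv)) hndt
        (fun p hp => hu0 p (List.mem_cons_of_mem _ hp)) hbfresh
      constructor
      · rw [ihu]
        simp [hun]
      · rw [ihb, PySem.Dict.items_insert_of_not_contains b0 _ (hb0 kv List.mem_cons_self)]
        simp [hun]

-- keys stay nodup through phase 1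
theorem pv_nodup_inner (lits : List Int) (i : Int) :
    ∀ d : PySem.Dict Int (PySem.Dict Int (List Int)),
    d.keys.Nodup → (lits.foldl (pvLitStepB i) d).keys.Nodup := by
  induction lits with
  | nil => intro d hd; exact hd
  | cons x t ih =>
    intro d hd
    rw [List.foldl_cons]
    apply ih
    unfold pvLitStepB
    simp only [PySem.Dict.modify]
    exact PySem.Dict.nodup_keys_insert _ _ _ hd

theorem pv_nodup_outer (l : List (Int × List Int)) :
    ∀ d : PySem.Dict Int (PySem.Dict Int (List Int)),
    d.keys.Nodup →
    (l.foldl (fun res ic => (ic.2.drop 1).foldl (pvLitStepB ic.1) res) d).keys.Nodup := by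
  induction l with
  | nil => intro d hd; exact hd
  | cons x t ih =>
    intro d hd
    rw [List.foldl_cons]
    exact ih _ (pv_nodup_inner _ _ _ hd)

theorem pv_nodup (f : List (List (List Int))) : (pvResultB f).keys.Nodup := by
  unfold pvResultB
  exact pv_nodup_outer _ _ (by simp [PySem.Dict.keys, PySem.Dict.empty])

-- the whole selection phase: A's sort-and-take-head equals B's min2?
theorem pv_selection (r : PySem.Dict Int (PySem.Dict Int (List Int))) (hnd : r.keys.Nodup) :
    (PySem.List.pyGetD (pvD r) 0 0,
     (r.getD (PySem.List.pyGetD (pvD r) 0 0) PySem.Dict.empty).items) =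
    (match PySem.List.min2? r.keys (fun v => (pvRank r v).1) (fun v => (pvRank r v).2) with
     | some best => (best, (r.getD best PySem.Dict.empty).items)
     | none => ((0 : Int), ([] : List (Int × List Int)))) := by
  have hndl : (r.items.map (·.1)).Nodup := hnd
  obtain ⟨hu, hb⟩ := pv_ubFold r.items PySem.Dict.empty PySem.Dict.empty hndl
    (fun p _ => PySem.Dict.contains_empty _) (fun p _ => PySem.Dict.contains_empty _)
  -- B side in pvFm2 form
  have hK : ∀ p ∈ r.items,
      (fun a => (pvRank r a.1).1) p = (fun p => if pvUn p then (1 : Int) else 0) p ∧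
      (fun a => (pvRank r a.1).2) p = pvK2 p := by
    intro p hp
    have hget : r.getD p.1 PySem.Dict.empty = p.2 :=
      PySem.Dict.getD_of_mem_items r (by exact hp) hnd _
    simp only [pvRank, pvK2, pvUn, pvSu, pvSb, hget]
    by_cases h : (p.2.size == 1) = true <;> simp [h]
  have hB : PySem.List.min2? r.keys (fun v => (pvRank r v).1) (fun v => (pvRank r v).2)
      = (pvFm2 (fun p => if pvUn p then (1 : Int) else 0) pvK2 r.items).map (·.1) := by
    rw [min2?_eq_pvFm2]
    have hk : r.keys = r.items.map (·.1) := rfl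
    rw [hk, pvFm2_map]
    rw [pvFm2_congr _ _ _ _ r.items hK]
  -- A side in pvFm2 form
  have hA : (pvD r).head?
      = (pvFm2 (fun p => if pvUn p then (1 : Int) else 0) pvK2 r.items).map (·.1) := by
    rw [pvFm2_split pvUn pvK2 r.items]
    unfold pvD pvUB
    by_cases hbe : r.items.filter (fun p => !pvUn p) = []
    · have hb' : (r.items.foldl pvUBStep (PySem.Dict.empty, PySem.Dict.empty)).2.items = [] := by
        rw [hb, hbe]; rfl
      have hsz : (r.items.foldl pvUBStep (PySem.Dict.empty, PySem.Dict.empty)).2.size = 0 := by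
        simp [PySem.Dict.size, hb']
      rw [if_neg (by simp [hsz]), if_pos hbe, head?_sorted]
      have hall : ∀ p ∈ r.items, pvUn p = true := by
        intro p hp
        have := List.filter_eq_nil_iff.mp hbe p hp
        simpa using this
      have hfl : r.items.filter pvUn = r.items := List.filter_eq_self.mpr hall
      have hukeys : (r.items.foldl pvUBStep (PySem.Dict.empty, PySem.Dict.empty)).1.keys
          = r.items.map (·.1) := by
        show ((r.items.foldl pvUBStep (PySem.Dict.empty, PySem.Dict.empty)).1.items.map (·.1)) = _
        rw [hu, hfl]
        simp [PySem.Dict.empty, List.map_map, Function.comp]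
      have hund : (r.items.foldl pvUBStep (PySem.Dict.empty, PySem.Dict.empty)).1.keys.Nodup := by
        rw [hukeys]; exact hndl
      rw [hukeys, pvFm1_map]
      congr 1
      apply pvFm1_congr
      intro p hp
      have hmem : (p.1, pvSu p)
          ∈ (r.items.foldl pvUBStep (PySem.Dict.empty, PySem.Dict.empty)).1.items := by
        rw [hu, hfl]
        exact List.mem_append.mpr (Or.inr (List.mem_map_of_mem hp))
      rw [PySem.Dict.getD_of_mem_items _ hmem hund]
      simp [pvK2, hall p hp]
    · have hb' : (r.items.foldl pvUBStep (PySem.Dict.empty, PySem.Dict.empty)).2.items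
          = (r.items.filter (fun p => !pvUn p)).map (fun p => (p.1, pvSb p)) := by
        rw [hb]; rfl
      have hsz : (r.items.foldl pvUBStep (PySem.Dict.empty, PySem.Dict.empty)).2.size ≠ 0 := by
        simp [PySem.Dict.size, hb', hbe]
      rw [if_pos hsz, if_neg hbe, head?_sorted]
      have hbkeys : (r.items.foldl pvUBStep (PySem.Dict.empty, PySem.Dict.empty)).2.keys
          = (r.items.filter (fun p => !pvUn p)).map (·.1) := by
        show ((r.items.foldl pvUBStep (PySem.Dict.empty, PySem.Dict.empty)).2.items.map (·.1)) = _
        rw [hb]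
        simp [PySem.Dict.empty, List.map_map, Function.comp]
      have hbnd : (r.items.foldl pvUBStep (PySem.Dict.empty, PySem.Dict.empty)).2.keys.Nodup := by
        rw [hbkeys]
        exact hndl.sublist (List.filter_sublist.map _)
      rw [hbkeys, pvFm1_map]
      congr 1
      apply pvFm1_congr
      intro p hp
      have hmem : (p.1, pvSb p)
          ∈ (r.items.foldl pvUBStep (PySem.Dict.empty, PySem.Dict.empty)).2.items := by
        rw [hb]
        exact List.mem_append.mpr (Or.inr (List.mem_map_of_mem hp))
      rw [PySem.Dict.getD_of_mem_items _ hmem hbnd]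
      have hup : pvUn p = false := by
        have := (List.mem_filter.mp hp).2; simpa using this
      simp [pvK2, hup]
  -- combine
  cases ho : pvFm2 (fun p => if pvUn p then (1 : Int) else 0) pvK2 r.items with
  | none =>
    have hl : r.items = [] := (pvFm2_none_iff _ _ _).mp ho
    have hd : pvD r = [] := by
      show pvD r = []
      unfold pvD pvUB
      rw [hl]
      rfl
    have hget : r.getD 0 (PySem.Dict.empty : PySem.Dict Int (List Int)) = PySem.Dict.empty := by
      simp [PySem.Dict.getD, PySem.Dict.get?, hl]
    rw [hB, ho, hd]
    show ((0 : Int), (r.getD 0 PySem.Dict.empty).items)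
        = ((0 : Int), ([] : List (Int × List Int)))
    rw [hget]
    rfl
  | some p =>
    have hhead : (pvD r).head? = some p.1 := by rw [hA, ho]; rfl
    obtain ⟨dt, hd⟩ : ∃ dt, pvD r = p.1 :: dt := by
      cases hDl : pvD r with
      | nil => rw [hDl] at hhead; simp at hhead
      | cons a dt =>
        rw [hDl] at hhead
        simp at hhead
        exact ⟨dt, by rw [hhead]⟩
    have hd0 : PySem.List.pyGetD (pvD r) 0 0 = p.1 := by
      rw [hd]
      simp [PySem.List.pyGetD, PySem.List.pyGet?, PySem.List.pyIdx?]
    rw [hB, ho, hd0]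
    rfl

-- ===== VERDICT (by name: the statement is the Claim_ definition above) =====
theorem choose_most_binate_spec : Claim_equal_choose_most_binate := by
  unfold Claim_equal_choose_most_binate
  intro f _ _
  unfold Spec_choose_most_binate choose_most_binate choose_most_binate_alt
  rw [pvResult_eq]
  exact pv_selection (pvResultB f) (pv_nodup f)
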